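-- pv_equiv track=rewrite | github.com/Tomoki-YAMASHITA/CrySPY | src/cryspy/util/struc_util.py | get_cn_comb_within_n
-- ===== SOURCE A (Python) =====
-- from itertools import combinations_with_replacement, product
--
-- def get_cn_comb_within_n(charge, cn_nmax):
--     '''
--     Find charge neutral combinations of atoms within n atoms
--
--     # ---------- args
--     charge (tuple): charge of atoms
--     cn_nmax (int): maximum number of atoms
--
--     # ---------- retrun
--     combinations (tuple): charge neutral combinations of atoms within n atoms
--
--     # ---------- example
--     charge = (2, 4, -2)
--     cn_nmax = 3
--
--     ((1, 0, 1), (0, 1, 2))  <-- cn_comb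
--     '''
--     cn_comb = []
--     for r in range(2, cn_nmax + 1):
--         for comb in combinations_with_replacement(range(len(charge)), r):
--             if sum(charge[i] for i in comb) == 0:
--                 count = tuple([comb.count(i) for i in range(len(charge))])
--                 cn_comb.append(count)
--     return tuple(cn_comb)
-- ===== SOURCE B (Python) =====
-- def get_cn_comb_within_n(charge, cn_nmax):
--     '''Charge-neutral atom-count combinations within n atoms.
--
--     Branch-and-bound recursion over atom types carrying the running count and
--     charge, with min/max charge feasibility pruning; emits count vectors
--     directly (no per-combination counting) in the same order as the original.
--     '''
--     charge = list(charge)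
--
--     def rec(chgs, rem, chg):
--         # count-suffixes over types `chgs` using exactly `rem` atoms, total charge == -chg
--         if not chgs:
--             return [()] if rem == 0 and chg == 0 else []
--         m = min(chgs)
--         M = max(chgs)
--         if chg + rem * m > 0 or chg + rem * M < 0:
--             return []
--         q = chgs[0]
--         rest = chgs[1:]
--         res = []
--         for c in range(rem, -1, -1):
--             for tail in rec(rest, rem - c, chg + c * q):
--                 res.append((c,) + tail)
--         return res
--
--     out = []
--     for r in range(2, cn_nmax + 1):
--         out.extend(rec(charge, r, 0))
--     return tuple(out)
-- ===== Notes on version B (the rewrite author's own statement) =====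
-- stated objective: alternative
-- what changed: Instead of enumerating every multiset of atom indices with combinations_with_replacement and then counting and summing each one, B recurses over atom types choosing each type's count directly, carrying the running atom count and charge, and prunes subtrees whose min/max remaining charge range cannot reach neutrality.
import Mathlib
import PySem

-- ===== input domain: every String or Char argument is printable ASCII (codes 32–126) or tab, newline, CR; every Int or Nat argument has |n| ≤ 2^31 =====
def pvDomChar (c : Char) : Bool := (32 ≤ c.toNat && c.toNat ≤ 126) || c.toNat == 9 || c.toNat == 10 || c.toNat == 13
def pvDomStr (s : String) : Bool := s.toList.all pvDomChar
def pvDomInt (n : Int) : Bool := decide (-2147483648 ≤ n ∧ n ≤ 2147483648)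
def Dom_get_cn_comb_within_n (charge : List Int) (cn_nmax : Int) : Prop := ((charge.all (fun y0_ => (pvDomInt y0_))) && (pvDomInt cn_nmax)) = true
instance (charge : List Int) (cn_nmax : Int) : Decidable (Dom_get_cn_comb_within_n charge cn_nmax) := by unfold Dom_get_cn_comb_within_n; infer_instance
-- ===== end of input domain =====

-- B replaces A's enumerate-all-index-multisets-then-count approach by a branch-and-bound
-- recursion over atom types with a running count/charge and min/max feasibility pruning
-- (same output values and order).


-- ===== PORT A =====
-- itertools.combinations_with_replacement(pool, r) in Python's lexicographic order
def pvCwr : List Nat → Nat → List (List Nat)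
  | _, 0 => [[]]
  | [], _ + 1 => []
  | x :: rest, r + 1 =>
      ((pvCwr (x :: rest) r).map (fun c => x :: c)) ++ pvCwr rest (r + 1)
termination_by xs r => (xs.length, r)

-- literal port of A; `charge.getD i 0` renders `charge[i]` (every index drawn from
-- range(len(charge)) is in range, so Python never raises here), and `r.toNat` is exact
-- since r ∈ range(2, cn_nmax+1) gives 2 ≤ r.
def get_cn_comb_within_n (charge : List Int) (cn_nmax : Int) : List (List Int) :=
  (PySem.List.pyRange 2 (cn_nmax + 1) 1).foldl
    (fun cn_comb r =>
      (pvCwr (List.range charge.length) r.toNat).foldl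
        (fun cn_comb comb =>
          if (comb.map (fun i => charge.getD i 0)).sum == 0 then
            cn_comb ++ [(List.range charge.length).map (fun i => ((comb.count i : Nat) : Int))]
          else cn_comb)
        cn_comb)
    []

-- ===== PORT B =====
-- rec(chgs, rem, chg) from Source B: count-suffixes over types `chgs` using exactly `rem`
-- atoms with total charge -chg; Python's min/max of a nonempty list is a left fold.
def pvRecB : List Int → Int → Int → List (List Int)
  | [], rem, chg => if rem = 0 ∧ chg = 0 then [[]] else []
  | q :: rest, rem, chg =>
      let m := rest.foldl min q
      let M := rest.foldl max q
      if 0 < chg + rem * m ∨ chg + rem * M < 0 then []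
      else
        (PySem.List.pyRange rem (-1) (-1)).flatMap
          (fun c => (pvRecB rest (rem - c) (chg + c * q)).map (fun tail => c :: tail))

def get_cn_comb_within_n_alt (charge : List Int) (cn_nmax : Int) : List (List Int) :=
  (PySem.List.pyRange 2 (cn_nmax + 1) 1).foldl
    (fun out r => out ++ pvRecB charge r 0) []

-- ===== PRECONDITION & SPEC =====
def Spec_get_cn_comb_within_n (charge : List Int) (cn_nmax : Int) (out : List (List Int)) : Prop := out = get_cn_comb_within_n_alt charge cn_nmax
instance (charge : List Int) (cn_nmax : Int) (out : List (List Int)) : Decidable (Spec_get_cn_comb_within_n charge cn_nmax out) := by unfold Spec_get_cn_comb_within_n; infer_instance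

-- ===== CLAIM (what is proved, stated in full; the proofs are below) =====
def Claim_equal_get_cn_comb_within_n : Prop := ∀ (charge : List Int) (cn_nmax : Int), Dom_get_cn_comb_within_n charge cn_nmax → Spec_get_cn_comb_within_n charge cn_nmax (get_cn_comb_within_n charge cn_nmax)

-- ===== LEMMAS AND PROOFS =====

-- all count vectors of length n summing to rem, first coordinate descending
-- (the common enumeration order of both programs)
def pvAllVecs : Nat → Nat → List (List Int)
  | 0, rem => if rem = 0 then [[]] else []
  | n + 1, rem =>
      (List.range (rem + 1)).flatMap
        (fun k => (pvAllVecs n k).map (fun t => ((rem - k : Nat) : Int) :: t))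

def pvDot : List Int → List Int → Int
  | c :: v, q :: cs => c * q + pvDot v cs
  | _, _ => 0

def pvBump : List Int → List Int
  | c :: t => (c + 1) :: t
  | [] => []

theorem pvFlatMap_congr {α β : Type} {l : List α} {f g : α → List β}
    (h : ∀ x ∈ l, f x = g x) : l.flatMap f = l.flatMap g := by
  simp only [List.flatMap_def]
  rw [List.map_congr_left h]

theorem pvAllVecs_mem {n rem : Nat} {v : List Int} (h : v ∈ pvAllVecs n rem) :
    v.length = n ∧ (∀ x ∈ v, 0 ≤ x) ∧ v.sum = (rem : Int) := by
  induction n generalizing rem v with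
  | zero =>
    simp only [pvAllVecs] at h
    split at h <;> simp_all
  | succ n ih =>
    simp only [pvAllVecs, List.mem_flatMap, List.mem_map, List.mem_range] at h
    obtain ⟨k, hk, t, ht, rfl⟩ := h
    obtain ⟨hl, hpos, hsum⟩ := ih ht
    refine ⟨by simp [hl], ?_, ?_⟩
    · intro x hx
      rcases List.mem_cons.1 hx with rfl | hx
      · positivity
      · exact hpos x hx
    · simp [hsum]; omega

theorem pvDot_ge {v cs : List Int} {m : Int} (hl : v.length = cs.length)
    (hv : ∀ x ∈ v, 0 ≤ x) (hc : ∀ y ∈ cs, m ≤ y) : v.sum * m ≤ pvDot v cs := by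
  induction v generalizing cs with
  | nil => cases cs <;> simp_all [pvDot]
  | cons c t ih =>
    cases cs with
    | nil => simp at hl
    | cons q qs =>
      have h1 : c * m ≤ c * q :=
        mul_le_mul_of_nonneg_left (hc q (by simp)) (hv c (by simp))
      have h2 : t.sum * m ≤ pvDot t qs :=
        ih (by simpa using hl) (fun x hx => hv x (by simp [hx]))
          (fun y hy => hc y (by simp [hy]))
      simp only [pvDot, List.sum_cons, add_mul]
      linarith

theorem pvDot_le {v cs : List Int} {M : Int} (hl : v.length = cs.length)
    (hv : ∀ x ∈ v, 0 ≤ x) (hc : ∀ y ∈ cs, y ≤ M) : pvDot v cs ≤ v.sum * M := by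
  induction v generalizing cs with
  | nil => cases cs <;> simp_all [pvDot]
  | cons c t ih =>
    cases cs with
    | nil => simp at hl
    | cons q qs =>
      have h1 : c * q ≤ c * M :=
        mul_le_mul_of_nonneg_left (hc q (by simp)) (hv c (by simp))
      have h2 : pvDot t qs ≤ t.sum * M :=
        ih (by simpa using hl) (fun x hx => hv x (by simp [hx]))
          (fun y hy => hc y (by simp [hy]))
      simp only [pvDot, List.sum_cons, add_mul]
      linarith

theorem pvFoldlMin_le {q : Int} {l : List Int} : ∀ y ∈ q :: l, l.foldl min q ≤ y := by
  induction l generalizing q with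
  | nil => simp
  | cons a t ih =>
    intro y hy
    rcases List.mem_cons.1 hy with rfl | hy
    · calc t.foldl min (min y a) ≤ min y a := ih _ (by simp)
        _ ≤ y := min_le_left _ _
    · rcases List.mem_cons.1 hy with rfl | hy
      · calc t.foldl min (min q y) ≤ min q y := ih _ (by simp)
          _ ≤ y := min_le_right _ _
      · exact ih y (by simp [hy])

theorem pvLe_foldlMax {q : Int} {l : List Int} : ∀ y ∈ q :: l, y ≤ l.foldl max q := by
  induction l generalizing q with
  | nil => simp
  | cons a t ih =>
    intro y hy
    rcases List.mem_cons.1 hy with rfl | hy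
    · calc y ≤ max y a := le_max_left _ _
        _ ≤ t.foldl max (max y a) := ih _ (by simp)
    · rcases List.mem_cons.1 hy with rfl | hy
      · calc y ≤ max q y := le_max_right _ _
          _ ≤ t.foldl max (max q y) := ih _ (by simp)
      · exact ih y (by simp [hy])

-- B equals the filtered enumeration of all count vectors (the pruned subtrees are empty)
theorem pvRecB_eq_filter (cs : List Int) (rem chg : Int) (hrem : 0 ≤ rem) :
    pvRecB cs rem chg
      = (pvAllVecs cs.length rem.toNat).filter (fun v => decide (chg + pvDot v cs = 0)) := by
  induction cs generalizing rem chg with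
  | nil =>
    simp only [pvRecB, pvAllVecs, List.length_nil]
    by_cases h : rem = 0
    · subst h
      by_cases hc : chg = 0 <;> simp [pvDot, hc]
    · have h' : rem.toNat ≠ 0 := by omega
      simp [h, h']
  | cons q rest ih =>
    simp only [pvRecB]
    by_cases hp : 0 < chg + rem * (rest.foldl min q) ∨ chg + rem * (rest.foldl max q) < 0
    · rw [if_pos hp]
      symm
      rw [List.filter_eq_nil_iff]
      intro v hv
      obtain ⟨hl, hpos, hsum⟩ := pvAllVecs_mem hv
      have hsum' : v.sum = rem := by rw [hsum]; omega
      have h1 : rem * (rest.foldl min q) ≤ pvDot v (q :: rest) := by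
        have h := pvDot_ge (cs := q :: rest) (by simp [hl]) hpos pvFoldlMin_le
        rw [hsum'] at h
        linarith [h]
      have h2 : pvDot v (q :: rest) ≤ rem * (rest.foldl max q) := by
        have h := pvDot_le (cs := q :: rest) (by simp [hl]) hpos pvLe_foldlMax
        rw [hsum'] at h
        linarith [h]
      simp only [decide_eq_true_eq]
      rcases hp with hp | hp <;> omega
    · rw [if_neg hp]
      rw [PySem.List.pyRange_neg_one, List.flatMap_map]
      have harg : (rem - -1).toNat = rem.toNat + 1 := by omega
      rw [harg]
      simp only [List.length_cons, pvAllVecs, List.filter_flatMap]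
      apply pvFlatMap_congr
      intro k hk
      have hk' : k < rem.toNat + 1 := List.mem_range.1 hk
      have e1 : rem - (rem - (k : Int)) = (k : Int) := by ring
      have e2 : rem - (k : Int) = ((rem.toNat - k : Nat) : Int) := by omega
      rw [e1, ih ((k : Int)) _ (by positivity), Int.toNat_natCast, ← e2, List.filter_map]
      congr 1
      apply List.filter_congr
      intro t _
      simp only [Function.comp, pvDot, decide_eq_decide]
      constructor <;> intro h <;> linarith

theorem pvAllVecs_zero (n : Nat) : pvAllVecs n 0 = [List.replicate n 0] := by
  induction n with
  | zero => simp [pvAllVecs]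
  | succ n ih => simp [pvAllVecs, List.range_one, ih, List.replicate_succ]

theorem pvAllVecs_succ (n r : Nat) :
    pvAllVecs (n + 1) (r + 1)
      = (pvAllVecs (n + 1) r).map pvBump ++ (pvAllVecs n (r + 1)).map (fun t => 0 :: t) := by
  conv_lhs => rw [pvAllVecs]
  rw [List.range_succ, List.flatMap_append, List.flatMap_singleton]
  congr 1
  · conv_rhs => rw [pvAllVecs]
    rw [List.map_flatMap]
    apply pvFlatMap_congr
    intro k hk
    have hk' : k < r + 1 := List.mem_range.1 hk
    rw [List.map_map]
    apply List.map_congr_left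
    intro t _
    simp only [Function.comp, pvBump]
    congr 1
    omega
  · simp

theorem pvCwr_subset : ∀ (xs : List Nat) (r : Nat), ∀ comb ∈ pvCwr xs r, ∀ i ∈ comb, i ∈ xs := by
  intro xs r
  induction xs, r using pvCwr.induct with
  | case1 xs => intro comb hc; simp only [pvCwr, List.mem_singleton] at hc; subst hc; simp
  | case2 r => intro comb hc; simp [pvCwr] at hc
  | case3 x rest r ih1 ih2 =>
    intro comb hc i hi
    simp only [pvCwr, List.mem_append, List.mem_map] at hc
    rcases hc with ⟨c, hc, rfl⟩ | hc
    · rcases List.mem_cons.1 hi with rfl | hi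
      · simp
      · exact ih1 c hc i hi
    · exact List.mem_cons_of_mem _ (ih2 comb hc i hi)

theorem pvCwr_count : ∀ (xs : List Nat) (r : Nat), xs.Nodup →
    (pvCwr xs r).map (fun comb => xs.map (fun i => ((comb.count i : Nat) : Int)))
      = pvAllVecs xs.length r := by
  intro xs r
  induction xs, r using pvCwr.induct with
  | case1 xs =>
    intro _
    simp [pvCwr, pvAllVecs_zero, List.count_nil, List.map_const']
  | case2 r => intro _; simp [pvCwr, pvAllVecs]
  | case3 x rest r ih1 ih2 =>
    intro hnd
    have hx : x ∉ rest := (List.nodup_cons.1 hnd).1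
    have hnd' : rest.Nodup := (List.nodup_cons.1 hnd).2
    simp only [pvCwr, List.map_append, List.map_map, List.length_cons]
    rw [pvAllVecs_succ]
    congr 1
    · have e1 := ih1 hnd
      simp only [List.length_cons] at e1
      rw [← e1, List.map_map]
      apply List.map_congr_left
      intro comb _
      simp only [Function.comp, pvBump, List.map_cons]
      have hhead : ((x :: comb).count x : Int) = (comb.count x : Int) + 1 := by
        simp
      rw [hhead]
      congr 1
      apply List.map_congr_left
      intro i hi
      have hne : ¬ x = i := fun h => hx (h ▸ hi)
      simp [hne]
    · have e2 := ih2 hnd'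
      rw [← e2, List.map_map]
      apply List.map_congr_left
      intro comb hcomb
      simp only [Function.comp, List.map_cons]
      have hxc : x ∉ comb := fun h => hx (pvCwr_subset rest (r + 1) comb hcomb x h)
      have : (comb.count x : Int) = 0 := by
        simp [List.count_eq_zero.2 hxc]
      rw [this]

theorem pvDot_zeros (f : Nat → Int) (xs : List Nat) :
    pvDot (xs.map (fun _ => (0 : Int))) (xs.map f) = 0 := by
  induction xs with
  | nil => simp [pvDot]
  | cons x t ih => simp only [List.map_cons, pvDot, ih]; ring

theorem pvDot_add (g h f : Nat → Int) (xs : List Nat) :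
    pvDot (xs.map (fun j => g j + h j)) (xs.map f)
      = pvDot (xs.map g) (xs.map f) + pvDot (xs.map h) (xs.map f) := by
  induction xs with
  | nil => simp [pvDot]
  | cons x t ih => simp only [List.map_cons, pvDot, ih]; ring

theorem pvDot_delta_notmem (f : Nat → Int) (i : Nat) (xs : List Nat) (h : i ∉ xs) :
    pvDot (xs.map (fun j => if j = i then (1 : Int) else 0)) (xs.map f) = 0 := by
  induction xs with
  | nil => simp [pvDot]
  | cons x t ih =>
    have hx : x ≠ i := fun e => h (by simp [e])
    have ht : i ∉ t := fun e => h (by simp [e])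
    simp [pvDot, hx, ih ht]

theorem pvDot_delta (f : Nat → Int) (i : Nat) (xs : List Nat) (hnd : xs.Nodup) (h : i ∈ xs) :
    pvDot (xs.map (fun j => if j = i then (1 : Int) else 0)) (xs.map f) = f i := by
  induction xs with
  | nil => simp at h
  | cons x t ih =>
    rcases List.mem_cons.1 h with h1 | hi
    · have hxt : x ∉ t := (List.nodup_cons.1 hnd).1
      subst h1
      simp [pvDot, pvDot_delta_notmem f i t hxt]
    · have hx : ¬ x = i := fun e => (List.nodup_cons.1 hnd).1 (e ▸ hi)
      simp [pvDot, hx, ih (List.nodup_cons.1 hnd).2 hi]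

theorem pvSum_eq_dot (f : Nat → Int) (xs : List Nat) (hnd : xs.Nodup) :
    ∀ comb : List Nat, (∀ i ∈ comb, i ∈ xs) →
      (comb.map f).sum = pvDot (xs.map (fun i => ((comb.count i : Nat) : Int))) (xs.map f) := by
  intro comb
  induction comb with
  | nil =>
    intro _
    simp only [List.map_nil, List.sum_nil, List.count_nil, Nat.cast_zero]
    exact (pvDot_zeros f xs).symm
  | cons i c ih =>
    intro hsub
    have hi : i ∈ xs := hsub i (by simp)
    have hstep : xs.map (fun j => (((i :: c).count j : Nat) : Int))
        = xs.map (fun j => ((c.count j : Nat) : Int) + if j = i then (1 : Int) else 0) := by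
      apply List.map_congr_left
      intro j _
      simp only [List.count_cons]
      push_cast
      by_cases h : j = i
      · simp [h]
      · simp [h, show ¬ i = j from fun e => h e.symm]
    rw [List.map_cons, List.sum_cons, hstep, pvDot_add,
      pvDot_delta f i xs hnd hi, ih (fun a ha => hsub a (by simp [ha]))]
    ring

theorem pvRangeMapGetD (xs : List Int) :
    (List.range xs.length).map (fun i => xs.getD i 0) = xs := by
  apply List.ext_getElem (by simp)
  intro i h1 h2
  simp only [List.getElem_map, List.getElem_range]
  rw [List.getD_eq_getElem]

theorem pvInner_eq (charge : List Int) (n : Nat) (acc : List (List Int)) :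
    (pvCwr (List.range charge.length) n).foldl
      (fun cn_comb comb =>
        if (comb.map (fun i => charge.getD i 0)).sum == 0 then
          cn_comb ++ [(List.range charge.length).map (fun i => ((comb.count i : Nat) : Int))]
        else cn_comb)
      acc
    = acc ++ pvRecB charge (n : Int) 0 := by
  simp only [PySem.List.foldl_append_if]
  congr 1
  have hfc : (pvCwr (List.range charge.length) n).filter
        (fun comb => (comb.map (fun i => charge.getD i 0)).sum == 0)
      = (pvCwr (List.range charge.length) n).filter
        (fun comb => decide (pvDot ((List.range charge.length).map
            (fun i => ((comb.count i : Nat) : Int))) charge = 0)) := by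
    apply List.filter_congr
    intro comb hcomb
    have hsub : ∀ i ∈ comb, i ∈ List.range charge.length :=
      pvCwr_subset (List.range charge.length) n comb hcomb
    have := pvSum_eq_dot (fun i => charge.getD i 0) (List.range charge.length)
      (List.nodup_range) comb hsub
    rw [pvRangeMapGetD] at this
    rw [this]
    rfl
  rw [hfc]
  have hfm : ((pvCwr (List.range charge.length) n).filter
        (fun comb => decide (pvDot ((List.range charge.length).map
            (fun i => ((comb.count i : Nat) : Int))) charge = 0))).map
        (fun comb => (List.range charge.length).map (fun i => ((comb.count i : Nat) : Int)))
      = ((pvCwr (List.range charge.length) n).map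
          (fun comb => (List.range charge.length).map (fun i => ((comb.count i : Nat) : Int)))).filter
        (fun v => decide (pvDot v charge = 0)) := by
    rw [List.filter_map]
    rfl
  rw [hfm, pvCwr_count (List.range charge.length) n List.nodup_range, List.length_range]
  rw [pvRecB_eq_filter charge (n : Int) 0 (by positivity), Int.toNat_natCast]
  apply List.filter_congr
  intro v _
  simp

-- ===== VERDICT (by name: the statement is the Claim_ definition above) =====
theorem get_cn_comb_within_n_spec : Claim_equal_get_cn_comb_within_n := by
  intro charge cn_nmax _
  unfold Spec_get_cn_comb_within_n get_cn_comb_within_n get_cn_comb_within_n_alt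
  apply PySem.List.foldl_congr_mem
  intro acc r hr
  have h2 : 2 ≤ r := (PySem.List.mem_pyRange_one.1 hr).1
  have hcast : ((r.toNat : Nat) : Int) = r := by omega
  have h := pvInner_eq charge r.toNat acc
  rw [hcast] at h
  exact h
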